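-- pv_equiv track=rewrite | github.com/Noam-Barzilay/PATH-ORAM | client.py | get_path_leaf_to_root
-- ===== SOURCE A (Python) =====
-- def get_path_leaf_to_root(leaf_index, L):
--     """
--     Returns the path from the leaf node to the root in a full binary tree (array representation).
--
--     Parameters:
--     - leaf_index (int): The index of the leaf (0 to 2^L - 1).
--     - L (int): The height (L) of the tree.
--
--     Returns:
--     - List[int]: The path from leaf to root in the array representation of the tree.
--     """
--     # Compute index of the leaf in the array representation
--     total_nodes = pow(2, (L + 1)) - 1
--     first_leaf_index = total_nodes - pow(2, L)
--     i = first_leaf_index + leaf_index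
--
--     path = []
--     while i >= 0:
--         path.append(i)
--         if i != 0:
--             i = (i - 1) // 2  # Move to parent
--         else:
--             break
--
--     return path
-- ===== SOURCE B (Python) =====
-- def get_path_leaf_to_root(leaf_index, L):
--     # 1-indexed heap position of the leaf: j = 2**L + leaf_index (= A's i + 1).
--     # Each ancestor, leaf to root, is obtained by a bit shift: (j >> k) - 1.
--     j = (1 << L) + leaf_index
--     if j <= 0:
--         return []
--     return [(j >> k) - 1 for k in range(j.bit_length())]
-- ===== Notes on version B (the rewrite author's own statement) =====
-- stated objective: alternative
-- what changed: Replaces A's iterative parent-pointer walk (i -> (i-1)//2 with append) by a closed-form per-level bit shift: the 1-indexed heap position j = 2**L + leaf_index gives the k-th path entry independently as (j >> k) - 1 over range(j.bit_length()).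
-- outside the precondition, e.g. on get_path_leaf_to_root(1, -1): A returns [0.5], B raises ValueError; on get_path_leaf_to_root(0, -1): A returns [], B raises ValueError
import Mathlib
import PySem

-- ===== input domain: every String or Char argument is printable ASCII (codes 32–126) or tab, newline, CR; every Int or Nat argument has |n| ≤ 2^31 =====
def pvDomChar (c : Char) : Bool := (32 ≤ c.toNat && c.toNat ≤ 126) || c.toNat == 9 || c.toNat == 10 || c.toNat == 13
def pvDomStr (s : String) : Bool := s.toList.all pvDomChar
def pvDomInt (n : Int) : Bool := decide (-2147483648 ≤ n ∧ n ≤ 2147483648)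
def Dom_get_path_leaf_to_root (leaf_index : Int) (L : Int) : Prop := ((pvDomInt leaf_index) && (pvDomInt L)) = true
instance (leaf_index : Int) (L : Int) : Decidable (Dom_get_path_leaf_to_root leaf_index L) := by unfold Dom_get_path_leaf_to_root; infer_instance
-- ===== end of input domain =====

-- B replaces A's parent-pointer loop by an independent per-level bit shift on the
-- 1-indexed heap position j = 2^L + leaf_index (objective: alternative, same cost).

-- ===== PORT A =====
-- the while loop: while i >= 0: path.append(i); if i != 0: i = (i-1)//2 else: break
def pvLoopA (i : Int) : List Int :=
  if h0 : 0 ≤ i then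
    if h1 : i ≠ 0 then i :: pvLoopA (PySem.Int.floordiv (i - 1) 2)
    else [i]
  else []
termination_by i.toNat
decreasing_by
  rw [PySem.Int.floordiv_eq_ediv_of_pos (by omega)]
  omega

def get_path_leaf_to_root (leaf_index : Int) (L : Int) : List Int :=
  -- pow(2, L+1) etc.; Pre_ restricts to 0 ≤ L (for L < 0 Python's pow yields floats)
  let total_nodes : Int := 2 ^ (L + 1).toNat - 1
  let first_leaf_index : Int := total_nodes - 2 ^ L.toNat
  pvLoopA (first_leaf_index + leaf_index)

-- ===== PORT B =====
def get_path_leaf_to_root_alt (leaf_index : Int) (L : Int) : List Int :=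
  let j : Int := (1 <<< L.toNat) + leaf_index   -- (1 << L) + leaf_index; Pre_ gives 0 ≤ L
  if j ≤ 0 then []
  else (List.range (PySem.Int.bitLength j)).map (fun (k : Nat) => (j >>> k) - 1)

-- ===== PRECONDITION & SPEC =====
-- Pre_ excludes L < 0, on which A's pow(2, L) is a float so A returns a list of
-- floats (or an accidental []) — not values of the declared int-list type; B raises there.
def Pre_get_path_leaf_to_root (leaf_index : Int) (L : Int) : Prop := 0 ≤ L
instance (leaf_index : Int) (L : Int) : Decidable (Pre_get_path_leaf_to_root leaf_index L) := by unfold Pre_get_path_leaf_to_root; infer_instance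
def pvWitness_get_path_leaf_to_root : Int × Int := (3, 2)
def Spec_get_path_leaf_to_root (leaf_index : Int) (L : Int) (out : List Int) : Prop := out = get_path_leaf_to_root_alt leaf_index L
instance (leaf_index : Int) (L : Int) (out : List Int) : Decidable (Spec_get_path_leaf_to_root leaf_index L out) := by unfold Spec_get_path_leaf_to_root; infer_instance

-- ===== CLAIM (what is proved, stated in full; the proofs are below) =====
def Claim_equal_get_path_leaf_to_root : Prop := ∀ (leaf_index : Int) (L : Int), Dom_get_path_leaf_to_root leaf_index L → Pre_get_path_leaf_to_root leaf_index L → Spec_get_path_leaf_to_root leaf_index L (get_path_leaf_to_root leaf_index L)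

-- ===== LEMMAS AND PROOFS =====

theorem pvShiftNat (m k : Nat) : ((m : Int) >>> k) = ((m >>> k : Nat) : Int) := by
  exact_mod_cast rfl

theorem pvKey : ∀ m : Nat, 1 ≤ m →
    pvLoopA ((m : Int) - 1) =
      (List.range (PySem.Int.bitLength (m : Int))).map (fun (k : Nat) => ((m : Int) >>> k) - 1) := by
  intro m
  induction m using Nat.strong_induction_on with
  | _ m ih =>
    intro hm
    rcases Nat.lt_or_ge m 2 with h2 | h2
    · interval_cases m
      rw [show ((1:Nat):Int) - 1 = 0 by norm_num, pvLoopA]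
      decide
    · have hm2 : 1 ≤ m / 2 := by omega
      have harg : PySem.Int.floordiv ((m : Int) - 1 - 1) 2 = ((m / 2 : Nat) : Int) - 1 := by
        rw [PySem.Int.floordiv_eq_ediv_of_pos (by norm_num)]
        omega
      rw [pvLoopA, dif_pos (by omega), dif_pos (by omega), harg,
        ih (m / 2) (by omega) hm2,
        PySem.Int.bitLength_natCast (show 0 < m by omega), List.range_succ_eq_map, List.map_cons,
        List.map_map]
      congr 1
      apply List.map_congr_left
      intro k _
      have hs : ((m : Int) >>> (k + 1)) = ((m / 2 : Nat) : Int) >>> k := by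
        rw [pvShiftNat, pvShiftNat]
        congr 1
        rw [Nat.shiftRight_eq_div_pow, Nat.shiftRight_eq_div_pow, Nat.div_div_eq_div_mul]
        congr 1
        ring
      simp [Function.comp, Nat.succ_eq_add_one, hs]

theorem pvLoopA_neg (i : Int) (h : i < 0) : pvLoopA i = [] := by
  rw [pvLoopA, dif_neg (by omega)]

-- ===== VERDICT (by name: the statement is the Claim_ definition above) =====
theorem get_path_leaf_to_root_spec : Claim_equal_get_path_leaf_to_root := by
  intro leaf L _ hL
  have hL0 : 0 ≤ L := hL
  unfold Spec_get_path_leaf_to_root get_path_leaf_to_root get_path_leaf_to_root_alt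
  have hL1 : (L + 1).toNat = L.toNat + 1 := by omega
  have hsh : ((1 <<< L.toNat : Nat) : Int) = 2 ^ L.toNat := by
    simp [Nat.shiftLeft_eq]
  set n := L.toNat with hn
  have hi : (2 : Int) ^ (L + 1).toNat - 1 - 2 ^ n + leaf = ((2 ^ n : Int) + leaf) - 1 := by
    rw [hL1, pow_succ]; ring
  simp only [hsh, hi]
  set j : Int := (2 ^ n : Int) + leaf with hj
  by_cases hle : j ≤ 0
  · rw [if_pos hle, pvLoopA_neg _ (by omega)]
  · rw [if_neg hle]
    have hjn : ((j.toNat : Int)) = j := Int.toNat_of_nonneg (by omega)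
    calc pvLoopA (j - 1) = pvLoopA ((j.toNat : Int) - 1) := by rw [hjn]
      _ = (List.range (PySem.Int.bitLength (j.toNat : Int))).map (fun (k : Nat) => ((j.toNat : Int)) >>> k - 1) := pvKey j.toNat (by omega)
      _ = (List.range (PySem.Int.bitLength j)).map (fun (k : Nat) => j >>> k - 1) := by rw [hjn]
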